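-- pv_equiv track=rewrite | github.com/mihirdarji695/Ai-Project | backend/app.py | parse_gemini_lesson_plan
-- ===== SOURCE A (Python) =====
-- def parse_gemini_lesson_plan(response):
--     """Parse Gemini's response into structured lesson plan"""
--     weeks = []
--     current_week = {}
--
--     for line in response.split('\n'):
--         line = line.strip()
--         if not line:
--             if current_week:
--                 weeks.append(current_week)
--                 current_week = {}
--         elif line.startswith('Week'):
--             current_week = {'week': line.split(':')[0].strip()}
--         elif line.startswith('Objectives:'):
--             current_week['objectives'] = line[11:].strip()
--         elif line.startswith('Methods:'):
--             current_week['methods'] = line[8:].strip()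
--         elif line.startswith('Activities:'):
--             current_week['activities'] = line[11:].strip()
--         elif line.startswith('Assessment:'):
--             current_week['assessment'] = line[11:].strip()
--
--     if current_week:
--         weeks.append(current_week)
--
--     return weeks
-- ===== SOURCE B (Python) =====
-- def _parse_block(block):
--     week = {}
--     for line in block:
--         if line.startswith('Week'):
--             week = {'week': line.split(':')[0].strip()}
--         elif line.startswith('Objectives:'):
--             week['objectives'] = line[11:].strip()
--         elif line.startswith('Methods:'):
--             week['methods'] = line[8:].strip()
--         elif line.startswith('Activities:'):
--             week['activities'] = line[11:].strip()
--         elif line.startswith('Assessment:'):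
--             week['assessment'] = line[11:].strip()
--     return week
--
--
-- def parse_gemini_lesson_plan(response):
--     """Parse Gemini's response into structured lesson plan (group lines into
--     blank-line-separated blocks, then parse each block)."""
--     blocks = []
--     cur = []
--     for raw in response.split('\n'):
--         line = raw.strip()
--         if line:
--             cur.append(line)
--         else:
--             blocks.append(cur)
--             cur = []
--     blocks.append(cur)
--     return [w for w in map(_parse_block, blocks) if w]
-- ===== Notes on version B (the rewrite author's own statement) =====
-- stated objective: alternative
-- what changed: Replaces A's single stateful line loop (weeks accumulator plus mutable current_week) with a two-phase group-then-parse decomposition: first partition the stripped lines into blank-line-separated blocks, then parse each block independently with a parse_block helper and keep the non-empty results.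
import Mathlib
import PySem

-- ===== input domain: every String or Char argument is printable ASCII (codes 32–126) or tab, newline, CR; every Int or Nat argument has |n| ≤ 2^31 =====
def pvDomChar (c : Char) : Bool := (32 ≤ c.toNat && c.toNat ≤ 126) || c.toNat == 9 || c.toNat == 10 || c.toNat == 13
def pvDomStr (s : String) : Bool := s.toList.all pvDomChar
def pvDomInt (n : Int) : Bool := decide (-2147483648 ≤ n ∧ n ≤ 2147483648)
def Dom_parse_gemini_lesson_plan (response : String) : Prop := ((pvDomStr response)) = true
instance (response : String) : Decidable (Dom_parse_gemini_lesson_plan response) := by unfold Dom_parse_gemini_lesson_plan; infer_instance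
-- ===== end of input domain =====

-- B re-decomposes A's single stateful line loop into group-into-blank-separated-blocks
-- then parse-each-block (objective: alternative decomposition, same cost).


-- ===== PORT A =====
-- one pass over the lines, carrying (weeks so far, current_week)
def pvStepA (st : List (PySem.Dict String String) × PySem.Dict String String) (raw : String) :
    List (PySem.Dict String String) × PySem.Dict String String :=
  let line := PySem.Str.strip raw
  if line = "" then
    if st.2.items.isEmpty then st else (st.1 ++ [st.2], PySem.Dict.empty)
  else if PySem.Str.startswith line "Week" then
    (st.1, PySem.Dict.insert PySem.Dict.empty "week"
      (PySem.Str.strip (((PySem.Str.split? line ":").getD []).headD "")))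
  else if PySem.Str.startswith line "Objectives:" then
    (st.1, st.2.insert "objectives" (PySem.Str.strip (PySem.Str.slice line (some 11) none)))
  else if PySem.Str.startswith line "Methods:" then
    (st.1, st.2.insert "methods" (PySem.Str.strip (PySem.Str.slice line (some 8) none)))
  else if PySem.Str.startswith line "Activities:" then
    (st.1, st.2.insert "activities" (PySem.Str.strip (PySem.Str.slice line (some 11) none)))
  else if PySem.Str.startswith line "Assessment:" then
    (st.1, st.2.insert "assessment" (PySem.Str.strip (PySem.Str.slice line (some 11) none)))
  else st

def parse_gemini_lesson_plan (response : String) : List (List (String × String)) :=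
  let st := ((PySem.Str.split? response "\n").getD []).foldl pvStepA ([], PySem.Dict.empty)
  let weeks := if st.2.items.isEmpty then st.1 else st.1 ++ [st.2]
  weeks.map (·.items)

-- ===== PORT B =====
-- phase 2 helper: parse one block of (already stripped, nonempty) lines into a dict
def pvApplyB (week : PySem.Dict String String) (line : String) : PySem.Dict String String :=
  if PySem.Str.startswith line "Week" then
    PySem.Dict.insert PySem.Dict.empty "week"
      (PySem.Str.strip (((PySem.Str.split? line ":").getD []).headD ""))
  else if PySem.Str.startswith line "Objectives:" then
    week.insert "objectives" (PySem.Str.strip (PySem.Str.slice line (some 11) none))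
  else if PySem.Str.startswith line "Methods:" then
    week.insert "methods" (PySem.Str.strip (PySem.Str.slice line (some 8) none))
  else if PySem.Str.startswith line "Activities:" then
    week.insert "activities" (PySem.Str.strip (PySem.Str.slice line (some 11) none))
  else if PySem.Str.startswith line "Assessment:" then
    week.insert "assessment" (PySem.Str.strip (PySem.Str.slice line (some 11) none))
  else week

def pvParseBlock (block : List String) : PySem.Dict String String :=
  block.foldl pvApplyB PySem.Dict.empty

-- phase 1: group stripped lines into blank-line-separated blocks
def pvGroupStep (st : List (List String) × List String) (raw : String) :
    List (List String) × List String :=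
  let line := PySem.Str.strip raw
  if line ≠ "" then (st.1, st.2 ++ [line]) else (st.1 ++ [st.2], [])

def parse_gemini_lesson_plan_alt (response : String) : List (List (String × String)) :=
  let st := ((PySem.Str.split? response "\n").getD []).foldl pvGroupStep ([], [])
  let blocks := st.1 ++ [st.2]
  (((blocks.map pvParseBlock).filter (fun w => !w.items.isEmpty)).map (·.items))

-- ===== PRECONDITION & SPEC =====
def Spec_parse_gemini_lesson_plan (response : String) (out : List (List (String × String))) : Prop := out = parse_gemini_lesson_plan_alt response
instance (response : String) (out : List (List (String × String))) : Decidable (Spec_parse_gemini_lesson_plan response out) := by unfold Spec_parse_gemini_lesson_plan; infer_instance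

-- ===== CLAIM (what is proved, stated in full; the proofs are below) =====
def Claim_equal_parse_gemini_lesson_plan : Prop := ∀ (response : String), Dom_parse_gemini_lesson_plan response → Spec_parse_gemini_lesson_plan response (parse_gemini_lesson_plan response)

-- ===== LEMMAS AND PROOFS =====

-- structural view of A's loop-plus-final-append, with the pending dict as state
def pvCoreA : List String → PySem.Dict String String → List (List (String × String))
  | [], cur => if cur.items.isEmpty then [] else [cur.items]
  | l :: ls, cur =>
      let line := PySem.Str.strip l
      if line = "" then
        if cur.items.isEmpty then pvCoreA ls cur else cur.items :: pvCoreA ls PySem.Dict.empty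
      else pvCoreA ls (pvApplyB cur line)

-- structural view of B's grouping-plus-emit, with the pending block as state
def pvCoreB : List String → List String → List (List (String × String))
  | [], b => if (pvParseBlock b).items.isEmpty then [] else [(pvParseBlock b).items]
  | l :: ls, b =>
      let line := PySem.Str.strip l
      if line = "" then
        if (pvParseBlock b).items.isEmpty then pvCoreB ls [] else (pvParseBlock b).items :: pvCoreB ls []
      else pvCoreB ls (b ++ [line])

-- on a nonblank stripped line, A's step is exactly B's per-line update
theorem pvStepA_nonblank (st : List (PySem.Dict String String) × PySem.Dict String String)
    (raw : String) (h : PySem.Str.strip raw ≠ "") :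
    pvStepA st raw = (st.1, pvApplyB st.2 (PySem.Str.strip raw)) := by
  simp only [pvStepA, pvApplyB, if_neg h]
  split_ifs <;> rfl

-- A's fold-then-finish equals accumulated prefix ++ pvCoreA
theorem pvA_fold (ls : List String) (ws : List (PySem.Dict String String))
    (cur : PySem.Dict String String) :
    (let st := ls.foldl pvStepA (ws, cur);
     (if st.2.items.isEmpty then st.1 else st.1 ++ [st.2]).map (·.items))
      = ws.map (·.items) ++ pvCoreA ls cur := by
  induction ls generalizing ws cur with
  | nil => simp only [List.foldl_nil, pvCoreA]; split_ifs <;> simp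
  | cons l ls ih =>
      simp only [List.foldl_cons, pvCoreA]
      by_cases hb : PySem.Str.strip l = ""
      · by_cases he : cur.items.isEmpty
        · have : pvStepA (ws, cur) l = (ws, cur) := by
            simp [pvStepA, hb, he]
          rw [this, ih]
          simp [hb, he]
        · have : pvStepA (ws, cur) l = (ws ++ [cur], PySem.Dict.empty) := by
            simp [pvStepA, hb, he]
          rw [this, ih]
          simp [hb, he]
      · rw [pvStepA_nonblank (ws, cur) l hb, ih]
        simp [hb]

-- B's fold-then-finish equals emitted prefix ++ pvCoreB
theorem pvB_fold (ls : List String) (bs : List (List String)) (cur : List String) :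
    (let st := ls.foldl pvGroupStep (bs, cur);
     (((st.1 ++ [st.2]).map pvParseBlock).filter (fun w => !w.items.isEmpty)).map (·.items))
      = (((bs.map pvParseBlock).filter (fun w => !w.items.isEmpty)).map (·.items)) ++ pvCoreB ls cur := by
  induction ls generalizing bs cur with
  | nil =>
      simp only [List.foldl_nil, pvCoreB]
      by_cases he : (pvParseBlock cur).items.isEmpty <;>
        simp [he, List.filter_append, List.map_append]
  | cons l ls ih =>
      simp only [List.foldl_cons, pvCoreB]
      by_cases hb : PySem.Str.strip l = ""
      · have : pvGroupStep (bs, cur) l = (bs ++ [cur], []) := by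
          simp [pvGroupStep, hb]
        rw [this, ih]
        by_cases he : (pvParseBlock cur).items.isEmpty <;>
          simp [hb, he, List.filter_append, List.map_append]
      · have : pvGroupStep (bs, cur) l = (bs, cur ++ [PySem.Str.strip l]) := by
          simp [pvGroupStep, hb]
        rw [this, ih]
        simp [hb]

-- an "empty" dict state is Dict.empty
theorem pvDict_empty_of_items_nil (d : PySem.Dict String String) (h : d.items.isEmpty) :
    d = PySem.Dict.empty := by
  apply PySem.Dict.ext
  simpa [List.isEmpty_iff] using h

-- the cores agree when A's dict state is the parse of B's block state
theorem pvCore_eq (ls : List String) (b : List String) :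
    pvCoreA ls (pvParseBlock b) = pvCoreB ls b := by
  induction ls generalizing b with
  | nil => rfl
  | cons l ls ih =>
      simp only [pvCoreA, pvCoreB]
      by_cases hb : PySem.Str.strip l = ""
      · by_cases he : (pvParseBlock b).items.isEmpty
        · rw [if_pos hb, if_pos hb, if_pos he, if_pos he,
            pvDict_empty_of_items_nil _ he]
          have : PySem.Dict.empty = pvParseBlock ([] : List String) := rfl
          rw [this, ih]
        · rw [if_pos hb, if_pos hb, if_neg he, if_neg he]
          have : (PySem.Dict.empty : PySem.Dict String String) = pvParseBlock ([] : List String) := rfl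
          rw [this, ih]
      · rw [if_neg hb, if_neg hb]
        have : pvApplyB (pvParseBlock b) (PySem.Str.strip l) = pvParseBlock (b ++ [PySem.Str.strip l]) := by
          simp [pvParseBlock]
        rw [this, ih]

-- ===== VERDICT (by name: the statement is the Claim_ definition above) =====
theorem parse_gemini_lesson_plan_spec : Claim_equal_parse_gemini_lesson_plan := by
  intro response _
  show parse_gemini_lesson_plan response = parse_gemini_lesson_plan_alt response
  unfold parse_gemini_lesson_plan parse_gemini_lesson_plan_alt
  rw [pvA_fold _ [] PySem.Dict.empty, pvB_fold _ [] []]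
  have : (PySem.Dict.empty : PySem.Dict String String) = pvParseBlock ([] : List String) := rfl
  rw [this, pvCore_eq]
  rfl
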